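-- pv_equiv track=rewrite | github.com/zstan/rzd | web.py | sort4Find
-- ===== SOURCE A (Python) =====
-- def sort4Find(sStations, suggest):
--   l0 = []
--   l1 = []
--   for station in sStations:
--     if station.lower().find(suggest) == 0:
--       l0.append(station)
--     else:
--       l1.append(station)
--   return l0 + l1
-- ===== SOURCE B (Python) =====
-- def sort4Find(sStations, suggest):
--   # idiomatic: one stable sort; prefix matches (key False) keep order before non-matches
--   return sorted(sStations, key=lambda s: s.lower().find(suggest) != 0)
-- ===== Notes on version B (the rewrite author's own statement) =====
-- stated objective: idiomatic
-- what changed: Replaced the explicit two-accumulator partition loop with a single stable sort on the boolean key s.lower().find(suggest) != 0, relying on sort stability to keep prefix-matches first in original order.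
import Mathlib
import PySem

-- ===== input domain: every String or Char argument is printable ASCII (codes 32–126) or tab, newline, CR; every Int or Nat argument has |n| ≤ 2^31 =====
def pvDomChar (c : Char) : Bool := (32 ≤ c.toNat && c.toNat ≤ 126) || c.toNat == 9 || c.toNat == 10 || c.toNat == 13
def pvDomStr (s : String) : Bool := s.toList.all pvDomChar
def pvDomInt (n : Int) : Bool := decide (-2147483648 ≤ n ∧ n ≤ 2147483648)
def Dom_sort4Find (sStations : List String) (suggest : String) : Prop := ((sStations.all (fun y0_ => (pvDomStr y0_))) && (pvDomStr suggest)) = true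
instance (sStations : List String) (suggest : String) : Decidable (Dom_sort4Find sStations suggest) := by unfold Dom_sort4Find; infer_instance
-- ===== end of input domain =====

-- B replaces A's explicit two-list partition loop with one stable sort on a boolean key (idiomatic, same cost class).


-- ===== PORT A =====
-- literal port: loop over sStations appending to l0 / l1, then l0 + l1
def sort4Find (sStations : List String) (suggest : String) : List String :=
  let acc := sStations.foldl
    (fun (p : List String × List String) station =>
      if PySem.Str.find (PySem.Str.lower station) suggest = 0 then
        (p.1 ++ [station], p.2)
      else
        (p.1, p.2 ++ [station]))
    ([], [])
  acc.1 ++ acc.2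

-- ===== PORT B =====
-- literal port of Source B: stable sort by the boolean key s.lower().find(suggest) != 0
def sort4Find_alt (sStations : List String) (suggest : String) : List String :=
  PySem.List.sorted sStations (fun s => decide (PySem.Str.find (PySem.Str.lower s) suggest ≠ 0)) false

-- ===== PRECONDITION & SPEC =====
def Spec_sort4Find (sStations : List String) (suggest : String) (out : List String) : Prop := out = sort4Find_alt sStations suggest
instance (sStations : List String) (suggest : String) (out : List String) : Decidable (Spec_sort4Find sStations suggest out) := by unfold Spec_sort4Find; infer_instance

-- ===== CLAIM (what is proved, stated in full; the proofs are below) =====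
def Claim_equal_sort4Find : Prop := ∀ (sStations : List String) (suggest : String), Dom_sort4Find sStations suggest → Spec_sort4Find sStations suggest (sort4Find sStations suggest)

-- ===== LEMMAS AND PROOFS =====

-- A's loop: the pair accumulator collects the matching / non-matching elements in order.
theorem sort4Find_foldl_acc {α : Type} (p : α → Prop) [DecidablePred p] (xs : List α) (l0 l1 : List α) :
    xs.foldl (fun (q : List α × List α) x => if p x then (q.1 ++ [x], q.2) else (q.1, q.2 ++ [x])) (l0, l1)
      = (l0 ++ xs.filter (fun x => decide (p x)), l1 ++ xs.filter (fun x => ! decide (p x))) := by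
  induction xs generalizing l0 l1 with
  | nil => simp
  | cons x xs ih =>
    by_cases h : p x <;> simp [h, ih]

-- inserting a key-true element into F ++ T (F all key-false, T all key-true) goes to the very end
theorem insertBy_partition_true {α : Type} (key : α → Bool) (x : α) (zs : List α)
    (hx : key x = true) :
    PySem.List.insertBy (fun a b => decide (key a < key b)) x zs = zs ++ [x] := by
  rw [PySem.List.insertBy_of_forall_not_before]
  intro y _; simp [hx]

-- inserting a key-false element lands at the end of the key-false block
theorem insertBy_partition_false {α : Type} (key : α → Bool) (x : α) (F T : List α)
    (hF : ∀ y ∈ F, key y = false) (hT : ∀ y ∈ T, key y = true) (hx : key x = false) :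
    PySem.List.insertBy (fun a b => decide (key a < key b)) x (F ++ T) = F ++ x :: T := by
  induction F with
  | nil =>
    cases T with
    | nil => simp [PySem.List.insertBy]
    | cons t ts =>
      have ht : key t = true := hT t (by simp)
      simp [PySem.List.insertBy, hx, ht]
  | cons f fs ihF =>
    have hf : key f = false := hF f (by simp)
    have hrec := ihF (fun y hy => hF y (List.mem_cons_of_mem _ hy))
    simp [PySem.List.insertBy, hf, hx, hrec]

-- the insertion-sort fold over a boolean key is exactly the stable partition
theorem foldl_insertBy_partition {α : Type} (key : α → Bool) (xs F T : List α)
    (hF : ∀ y ∈ F, key y = false) (hT : ∀ y ∈ T, key y = true) :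
    xs.foldl (fun acc x => PySem.List.insertBy (fun a b => decide (key a < key b)) x acc) (F ++ T)
      = (F ++ xs.filter (fun x => ! key x)) ++ (T ++ xs.filter key) := by
  induction xs generalizing F T with
  | nil => simp
  | cons x xs ih =>
    simp only [List.foldl_cons]
    cases hx : key x with
    | true =>
      rw [insertBy_partition_true key x (F ++ T) hx, List.append_assoc F T [x],
        ih F (T ++ [x]) hF
          (by intro y hy; rcases List.mem_append.mp hy with h | h
              · exact hT y h
              · simp at h; subst h; exact hx)]
      simp [hx]
    | false =>
      rw [insertBy_partition_false key x F T hF hT hx,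
        show F ++ x :: T = (F ++ [x]) ++ T by simp,
        ih (F ++ [x]) T
          (by intro y hy; rcases List.mem_append.mp hy with h | h
              · exact hF y h
              · simp at h; subst h; exact hx) hT]
      simp [hx]

-- a stable sort on a Bool key is the stable partition: key-false elements first, in order
theorem sorted_bool_key {α : Type} (key : α → Bool) (xs : List α) :
    PySem.List.sorted xs key false = xs.filter (fun x => ! key x) ++ xs.filter key := by
  rw [PySem.List.sorted_eq_foldl_insertBy]
  simpa using foldl_insertBy_partition key xs [] [] (by simp) (by simp)

-- ===== VERDICT (by name: the statement is the Claim_ definition above) =====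
theorem sort4Find_spec : Claim_equal_sort4Find := by
  intro sStations suggest _
  unfold Spec_sort4Find sort4Find sort4Find_alt
  rw [sorted_bool_key]
  simp only [sort4Find_foldl_acc (fun s => PySem.Str.find (PySem.Str.lower s) suggest = 0)
    sStations ([] : List String) ([] : List String), List.nil_append]
  congr 1 <;> (apply List.filter_congr; intro x _; simp)
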